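-- pv_equiv track=rewrite | github.com/metsakast/exercises | Dictionary exercises.py | unique_dict_items
-- ===== SOURCE A (Python) =====
-- def unique_dict_items(dict1: dict, dict2: dict) -> dict:
--     """
--     Find unique items from two dictionaries.
--
--     You are given two dictionaries.
--     Your task is to find the key-value pairs from both
--     dictionaries that are unique to each dictionary.
--     (This means key-value paris that are present only in one of them)
--
--     If two dictionaries contain same keys then you can be sure that the values
--     are also identical. It means that such case is not possible: dict1 = {"a": 1}, dict2 = {"a": 2}.
--
--     :param dict1: First dictionary.
--     :param dict2: Second dictionary.
--     :return: Unique items from both dictionaries.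
--     """
--     unique_items = dict()
--     for key, value in dict1.items():
--         if key not in dict2:
--             unique_items[key] = value
--     for key, value in dict2.items():
--         if key not in dict1:
--             unique_items[key] = value
--     return unique_items
--     pass
-- ===== SOURCE B (Python) =====
-- def unique_dict_items(dict1: dict, dict2: dict) -> dict:
--     """Multiset approach: concatenate all items, count how often each key
--     occurs across both dicts, and keep the pairs whose key occurs exactly once."""
--     merged = list(dict1.items()) + list(dict2.items())
--     counts = {}
--     for k, _ in merged:
--         counts[k] = counts.get(k, 0) + 1
--     return {k: v for k, v in merged if counts[k] == 1}
-- ===== Notes on version B (the rewrite author's own statement) =====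
-- stated objective: alternative
-- what changed: Instead of two filter loops each testing membership in the other dict, B concatenates all items, builds a key-occurrence counter in one pass, and keeps exactly the pairs whose key occurs once in the combined multiset; no cross-dict membership test remains.
import Mathlib
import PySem

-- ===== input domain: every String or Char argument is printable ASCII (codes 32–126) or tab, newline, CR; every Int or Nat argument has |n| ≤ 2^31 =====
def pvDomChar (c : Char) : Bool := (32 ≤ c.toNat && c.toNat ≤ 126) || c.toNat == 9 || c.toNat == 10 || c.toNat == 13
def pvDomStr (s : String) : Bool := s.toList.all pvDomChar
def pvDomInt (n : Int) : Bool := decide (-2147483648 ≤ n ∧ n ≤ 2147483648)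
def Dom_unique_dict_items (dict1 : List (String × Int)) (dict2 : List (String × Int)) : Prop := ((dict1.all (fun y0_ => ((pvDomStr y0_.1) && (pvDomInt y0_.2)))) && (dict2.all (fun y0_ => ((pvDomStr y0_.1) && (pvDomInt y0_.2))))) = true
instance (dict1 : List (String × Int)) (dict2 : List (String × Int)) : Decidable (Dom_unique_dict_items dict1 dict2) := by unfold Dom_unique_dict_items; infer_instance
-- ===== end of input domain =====

-- B replaces the two cross-dict membership filters by one key-occurrence counter
-- over the concatenated items, keeping the pairs whose key occurs exactly once (same cost, alternative algorithm).

-- ===== PORT A =====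
-- Port of A: two filter loops, each inserting keys absent from the other dict.
def unique_dict_items (dict1 : List (String × Int)) (dict2 : List (String × Int)) : List (String × Int) :=
  let d1 : PySem.Dict String Int := PySem.Dict.ofList dict1
  let d2 : PySem.Dict String Int := PySem.Dict.ofList dict2
  let u1 : PySem.Dict String Int :=
    d1.items.foldl (fun u p => if !(d2.contains p.1) then u.insert p.1 p.2 else u) PySem.Dict.empty
  let u2 : PySem.Dict String Int :=
    d2.items.foldl (fun u p => if !(d1.contains p.1) then u.insert p.1 p.2 else u) u1
  u2.items

-- ===== PORT B =====
-- Port of B: concatenate all items, count each key's occurrences, keep pairs whose key occurs exactly once.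
def unique_dict_items_alt (dict1 : List (String × Int)) (dict2 : List (String × Int)) : List (String × Int) :=
  let d1 : PySem.Dict String Int := PySem.Dict.ofList dict1
  let d2 : PySem.Dict String Int := PySem.Dict.ofList dict2
  let merged : List (String × Int) := d1.items ++ d2.items
  let counts : PySem.Dict String Int :=
    merged.foldl (fun c p => c.insert p.1 (c.getD p.1 0 + 1)) PySem.Dict.empty
  (PySem.Dict.ofList (merged.filter (fun p => counts.getD p.1 0 == 1))).items

-- ===== PRECONDITION & SPEC =====
def Spec_unique_dict_items (dict1 : List (String × Int)) (dict2 : List (String × Int)) (out : List (String × Int)) : Prop := out = unique_dict_items_alt dict1 dict2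
instance (dict1 : List (String × Int)) (dict2 : List (String × Int)) (out : List (String × Int)) : Decidable (Spec_unique_dict_items dict1 dict2 out) := by unfold Spec_unique_dict_items; infer_instance

-- ===== CLAIM =====
def Claim_equal_unique_dict_items : Prop := ∀ (dict1 : List (String × Int)) (dict2 : List (String × Int)), Dom_unique_dict_items dict1 dict2 → Spec_unique_dict_items dict1 dict2 (unique_dict_items dict1 dict2)

-- ===== LEMMAS AND PROOFS =====

-- A guarded insert loop is an insert loop over the filtered list.
theorem foldl_if_filter (l : List (String × Int)) (q : String × Int → Bool) (u : PySem.Dict String Int) :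
    l.foldl (fun u p => if q p then u.insert p.1 p.2 else u) u
      = (l.filter q).foldl (fun u p => u.insert p.1 p.2) u := by
  induction l generalizing u with
  | nil => rfl
  | cons a t ih =>
    rw [List.foldl_cons, List.filter_cons]
    cases h : q a
    · rw [if_neg (by simp), if_neg (by simp)]
      exact ih u
    · rw [if_pos (by simp), if_pos (by simp), List.foldl_cons]
      exact ih _

-- Inserting a list of pairs with fresh distinct keys appends it to the items.
theorem items_insert_fold (l : List (String × Int)) (d : PySem.Dict String Int)
    (hfresh : ∀ a ∈ l, d.contains a.1 = false) (hnd : (l.map Prod.fst).Nodup) :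
    (l.foldl (fun u p => u.insert p.1 p.2) d).items = d.items ++ l := by
  have h := PySem.Dict.items_foldl_insert_fresh l Prod.fst Prod.snd d hfresh hnd
  simpa using h

-- The counter loop of B counts key occurrences in the merged list.
theorem counts_getD (l : List (String × Int)) (k : String) :
    (l.foldl (fun c p => c.insert p.1 (c.getD p.1 0 + 1)) PySem.Dict.empty).getD k 0
      = ((l.map Prod.fst).count k : Int) := by
  have h := PySem.Dict.getD_foldl_insert_add_one (l.map Prod.fst) PySem.Dict.empty k
  rw [List.foldl_map] at h
  simpa using h

theorem unique_dict_items_spec : Claim_equal_unique_dict_items := by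
  unfold Claim_equal_unique_dict_items
  intro dict1 dict2 _
  unfold Spec_unique_dict_items unique_dict_items unique_dict_items_alt
  set d1 : PySem.Dict String Int := PySem.Dict.ofList dict1 with hd1
  set d2 : PySem.Dict String Int := PySem.Dict.ofList dict2 with hd2
  set F1 : List (String × Int) := d1.items.filter (fun p => !(d2.contains p.1)) with hF1
  set F2 : List (String × Int) := d2.items.filter (fun p => !(d1.contains p.1)) with hF2
  have nd1 : (d1.items.map Prod.fst).Nodup := PySem.Dict.nodup_keys_ofList dict1
  have nd2 : (d2.items.map Prod.fst).Nodup := PySem.Dict.nodup_keys_ofList dict2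
  have hsub1 : (F1.map Prod.fst).Sublist (d1.items.map Prod.fst) :=
    List.Sublist.map Prod.fst List.filter_sublist
  have hsub2 : (F2.map Prod.fst).Sublist (d2.items.map Prod.fst) :=
    List.Sublist.map Prod.fst List.filter_sublist
  have ndF1 : (F1.map Prod.fst).Nodup := nd1.sublist hsub1
  have ndF2 : (F2.map Prod.fst).Nodup := nd2.sublist hsub2
  have hkeys1 : ∀ (k : String), k ∈ d1.items.map Prod.fst ↔ d1.contains k = true := by
    intro k
    rw [PySem.Dict.contains_eq_decide_mem_keys]
    simp [PySem.Dict.keys]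
  have hkeys2 : ∀ (k : String), k ∈ d2.items.map Prod.fst ↔ d2.contains k = true := by
    intro k
    rw [PySem.Dict.contains_eq_decide_mem_keys]
    simp [PySem.Dict.keys]
  have hF1not : ∀ k ∈ F1.map Prod.fst, d2.contains k = false := by
    intro k hk
    rcases List.mem_map.1 hk with ⟨p, hp, rfl⟩
    have := List.of_mem_filter hp
    simpa using this
  have hF2in : ∀ k ∈ F2.map Prod.fst, d2.contains k = true := by
    intro k hk
    rcases List.mem_map.1 hk with ⟨p, hp, rfl⟩
    have hp' : p ∈ d2.items := List.mem_of_mem_filter hp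
    exact (hkeys2 p.1).1 (List.mem_map.2 ⟨p, hp', rfl⟩)
  -- A side: items = F1 ++ F2
  have hA :
      ((d2.items.foldl (fun u p => if !(d1.contains p.1) then u.insert p.1 p.2 else u)
        (d1.items.foldl (fun u p => if !(d2.contains p.1) then u.insert p.1 p.2 else u)
          PySem.Dict.empty)).items) = F1 ++ F2 := by
    rw [foldl_if_filter, foldl_if_filter]
    have h1 : ((F1.foldl (fun u p => u.insert p.1 p.2) PySem.Dict.empty)).items = F1 := by
      rw [items_insert_fold F1 PySem.Dict.empty (fun a _ => by simp) ndF1]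
      rfl
    rw [items_insert_fold F2 _ ?_ ndF2, h1]
    intro a ha
    have hk1 : (F1.foldl (fun u p => u.insert p.1 p.2) PySem.Dict.empty).keys = F1.map Prod.fst := by
      simp only [PySem.Dict.keys, h1]
    rw [PySem.Dict.contains_eq_decide_mem_keys, hk1]
    simp only [decide_eq_false_iff_not]
    intro hmem
    have h2f : d2.contains a.1 = false := hF1not a.1 hmem
    have h2t : d2.contains a.1 = true := hF2in a.1 (List.mem_map.2 ⟨a, ha, rfl⟩)
    simp [h2f] at h2t
  -- counts of a key in the merged key list
  have hcount : ∀ (k : String),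
      ((d1.items ++ d2.items).map Prod.fst).count k
        = (if d1.contains k then 1 else 0) + (if d2.contains k then 1 else 0) := by
    intro k
    rw [List.map_append, List.count_append]
    congr 1
    · by_cases h : d1.contains k = true
      · rw [if_pos h]
        exact List.count_eq_one_of_mem nd1 ((hkeys1 k).2 h)
      · rw [if_neg h]
        exact List.count_eq_zero.2 (fun hm => h ((hkeys1 k).1 hm))
    · by_cases h : d2.contains k = true
      · rw [if_pos h]
        exact List.count_eq_one_of_mem nd2 ((hkeys2 k).2 h)
      · rw [if_neg h]
        exact List.count_eq_zero.2 (fun hm => h ((hkeys2 k).1 hm))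
  -- B side: the count-filtered concatenation is F1 ++ F2
  have hfilt :
      (d1.items ++ d2.items).filter
          (fun p => ((d1.items ++ d2.items).foldl
              (fun c q => c.insert q.1 (c.getD q.1 0 + 1)) (PySem.Dict.empty : PySem.Dict String Int)).getD p.1 0 == 1)
        = F1 ++ F2 := by
    rw [List.filter_append]
    congr 1
    · refine List.filter_congr ?_
      intro p hp
      have h1 : d1.contains p.1 = true := (hkeys1 p.1).1 (List.mem_map.2 ⟨p, hp, rfl⟩)
      rw [counts_getD (d1.items ++ d2.items) p.1, hcount, h1]
      cases h2 : d2.contains p.1 <;> simp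
    · refine List.filter_congr ?_
      intro p hp
      have h2 : d2.contains p.1 = true := (hkeys2 p.1).1 (List.mem_map.2 ⟨p, hp, rfl⟩)
      rw [counts_getD (d1.items ++ d2.items) p.1, hcount, h2]
      cases h1 : d1.contains p.1 <;> simp
  have hdisj : ∀ k ∈ F1.map Prod.fst, ¬ k ∈ F2.map Prod.fst := by
    intro k h1 h2
    have := hF1not k h1
    have := hF2in k h2
    simp_all
  have ndB : ((F1 ++ F2).map Prod.fst).Nodup := by
    rw [List.map_append]
    exact List.Nodup.append ndF1 ndF2 (List.disjoint_left.2 hdisj)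
  have hB :
      (PySem.Dict.ofList
        ((d1.items ++ d2.items).filter
          (fun p => ((d1.items ++ d2.items).foldl
              (fun c q => c.insert q.1 (c.getD q.1 0 + 1)) (PySem.Dict.empty : PySem.Dict String Int)).getD p.1 0 == 1))).items
        = F1 ++ F2 := by
    rw [hfilt]
    show ((F1 ++ F2).foldl (fun u p => u.insert p.1 p.2) PySem.Dict.empty).items = F1 ++ F2
    rw [items_insert_fold (F1 ++ F2) PySem.Dict.empty (fun a _ => by simp) ndB]
    rfl
  simp only []
  rw [hA]
  exact hB.symm
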